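-- pv_equiv track=rewrite | github.com/Count-group/project1 | results/codes/算法竞赛/doubao/CF2066D2_3.py | is_valid_fill
-- ===== SOURCE A (Python) =====
-- def is_valid_fill(n, c, sequence, fills):
--     current_sequence = []
--     fill_index = 0
--     for num in sequence:
--         if num == 0:
--             current_sequence.append(fills[fill_index])
--             fill_index += 1
--         else:
--             current_sequence.append(num)
--     for i in range(1, n + 1):
--         count = 0
--         for j, floor in enumerate(current_sequence):
--             if floor <= i:
--                 count += 1
--                 if count >= c:
--                     break
--         else:
--             return False
--     return True
-- ===== SOURCE B (Python) =====
-- def is_valid_fill(n, c, sequence, fills):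
--     cnt = 0
--     fi = 0
--     for x in sequence:
--         if x == 0:
--             v = fills[fi]
--             fi += 1
--         else:
--             v = x
--         if v <= 1:
--             cnt += 1
--     return n <= 0 or cnt >= c
-- ===== Notes on version B (the rewrite author's own statement) =====
-- stated objective: faster
-- what changed: The nested scan over all thresholds 1..n disappears: since the count of floors ≤ i is monotone in i, one pass counts the filled floors ≤ 1 and compares that count to c once, O(len) instead of O(n*len).
-- intended difference: When c <= 0, n >= 1 and every filled floor value exceeds 1, A returns False because its break sits inside the count-increment branch so it still demands a floor <= i even though the required count c is already met; B returns True, the intended value since a non-positive requirement is trivially satisfied. — e.g. on is_valid_fill(1, 0, [2], []): A returns false, B returns true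
import Mathlib
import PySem

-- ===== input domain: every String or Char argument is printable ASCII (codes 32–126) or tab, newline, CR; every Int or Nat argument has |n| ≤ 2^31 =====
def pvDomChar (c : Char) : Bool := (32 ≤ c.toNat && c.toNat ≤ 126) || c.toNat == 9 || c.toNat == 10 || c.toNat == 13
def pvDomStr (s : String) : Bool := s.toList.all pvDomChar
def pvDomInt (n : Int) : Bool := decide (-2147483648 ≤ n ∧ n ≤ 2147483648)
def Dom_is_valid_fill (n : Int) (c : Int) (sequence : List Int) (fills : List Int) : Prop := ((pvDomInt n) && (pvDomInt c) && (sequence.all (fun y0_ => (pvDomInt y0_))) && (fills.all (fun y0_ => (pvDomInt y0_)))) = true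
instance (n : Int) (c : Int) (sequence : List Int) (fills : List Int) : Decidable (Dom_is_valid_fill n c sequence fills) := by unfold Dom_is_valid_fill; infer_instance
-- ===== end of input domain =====

-- B replaces A's scan over every threshold 1..n by one pass that counts the filled floors ≤ 1
-- (the count of floors ≤ i is monotone in i), an asymptotic speed-up; on the D_ corner below B fixes A's value.

-- ===== PORT A =====
-- inner 'for j, floor in enumerate(current_sequence)' loop with its for-else: returns true iff it breaks
def pvInnerA (c : Int) (i : Int) : List Int → Int → Bool
  | [], _ => false
  | floor :: rest, count =>
      if floor ≤ i then
        (if count + 1 ≥ c then true else pvInnerA c i rest (count + 1))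
      else pvInnerA c i rest count

-- outer 'for i in range(1, n+1)' loop: early 'return False' when the inner loop did not break
def pvOuterA (c : Int) (cur : List Int) : List Int → Bool
  | [] => true
  | i :: rest => if pvInnerA c i cur 0 then pvOuterA c cur rest else false

def is_valid_fill (n : Int) (c : Int) (sequence : List Int) (fills : List Int) : Bool :=
  -- first loop builds current_sequence (state: built list, fill_index), then the range loop runs on it
  pvOuterA c
    (sequence.foldl
      (fun (st : List Int × Int) num =>
        if num = 0 then (st.1 ++ [(PySem.List.pyGet? fills st.2).getD 0], st.2 + 1)
        else (st.1 ++ [num], st.2))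
      ([], 0)).1
    (PySem.List.pyRange 1 (n + 1) 1)

-- ===== PORT B =====
def is_valid_fill_alt (n : Int) (c : Int) (sequence : List Int) (fills : List Int) : Bool :=
  -- one pass: state (fi, cnt); cnt counts filled floors ≤ 1
  decide (n ≤ 0) ||
    decide ((sequence.foldl
      (fun (st : Int × Int) x =>
        let v := if x = 0 then (PySem.List.pyGet? fills st.1).getD 0 else x
        (if x = 0 then st.1 + 1 else st.1, if v ≤ 1 then st.2 + 1 else st.2))
      (0, 0)).2 ≥ c)

-- ===== PRECONDITION & SPEC =====
-- Pre_ excludes only the inputs where A raises IndexError: more zeros in sequence than values in fills.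
def Pre_is_valid_fill (n : Int) (c : Int) (sequence : List Int) (fills : List Int) : Prop :=
  sequence.count 0 ≤ fills.length
instance (n : Int) (c : Int) (sequence : List Int) (fills : List Int) : Decidable (Pre_is_valid_fill n c sequence fills) := by unfold Pre_is_valid_fill; infer_instance
def pvWitness_is_valid_fill : Int × Int × List Int × List Int := (2, 1, [0, 2], [1])

-- When c ≤ 0, n ≥ 1 and every filled floor value exceeds 1, A returns False because its break sits inside
-- the count-increment branch so it still demands a floor ≤ i even though the required count c is already met;
-- B returns True, the intended value since a non-positive requirement is trivially satisfied.
def D_is_valid_fill (n : Int) (c : Int) (sequence : List Int) (fills : List Int) : Prop :=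
  c ≤ 0 ∧ 1 ≤ n ∧ (∀ x ∈ sequence, x = 0 ∨ 1 < x) ∧ (∀ y ∈ fills.take (sequence.count 0), 1 < y)
instance (n : Int) (c : Int) (sequence : List Int) (fills : List Int) : Decidable (D_is_valid_fill n c sequence fills) := by unfold D_is_valid_fill; infer_instance

def Spec_is_valid_fill (n : Int) (c : Int) (sequence : List Int) (fills : List Int) (out : Bool) : Prop := ¬ D_is_valid_fill n c sequence fills → out = is_valid_fill_alt n c sequence fills
instance (n : Int) (c : Int) (sequence : List Int) (fills : List Int) (out : Bool) : Decidable (Spec_is_valid_fill n c sequence fills out) := by unfold Spec_is_valid_fill; infer_instance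

def pvDiffWitness_is_valid_fill : Int × Int × List Int × List Int := (1, 0, [2], [])
def pvDiffWitnessOut_is_valid_fill : Bool × Bool := (false, true)

-- ===== CLAIM (what is proved, stated in full; the proofs are below) =====
def Claim_unchanged_is_valid_fill : Prop := ∀ (n : Int) (c : Int) (sequence : List Int) (fills : List Int), Dom_is_valid_fill n c sequence fills → Pre_is_valid_fill n c sequence fills → Spec_is_valid_fill n c sequence fills (is_valid_fill n c sequence fills)
def Claim_changed_is_valid_fill : Prop := Dom_is_valid_fill (pvDiffWitness_is_valid_fill.1) (pvDiffWitness_is_valid_fill.2.1) (pvDiffWitness_is_valid_fill.2.2.1) (pvDiffWitness_is_valid_fill.2.2.2) ∧ Pre_is_valid_fill (pvDiffWitness_is_valid_fill.1) (pvDiffWitness_is_valid_fill.2.1) (pvDiffWitness_is_valid_fill.2.2.1) (pvDiffWitness_is_valid_fill.2.2.2) ∧ D_is_valid_fill (pvDiffWitness_is_valid_fill.1) (pvDiffWitness_is_valid_fill.2.1) (pvDiffWitness_is_valid_fill.2.2.1) (pvDiffWitness_is_valid_fill.2.2.2) ∧ is_valid_fill (pvDiffWitness_is_valid_fill.1) (pvDiffWitness_is_valid_fill.2.1)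 (pvDiffWitness_is_valid_fill.2.2.1) (pvDiffWitness_is_valid_fill.2.2.2) = pvDiffWitnessOut_is_valid_fill.1 ∧ is_valid_fill_alt (pvDiffWitness_is_valid_fill.1) (pvDiffWitness_is_valid_fill.2.1) (pvDiffWitness_is_valid_fill.2.2.1) (pvDiffWitness_is_valid_fill.2.2.2) = pvDiffWitnessOut_is_valid_fill.2 ∧ pvDiffWitnessOut_is_valid_fill.1 ≠ pvDiffWitnessOut_is_valid_fill.2
def Claim_exact_is_valid_fill : Prop := ∀ (n : Int) (c : Int) (sequence : List Int) (fills : List Int), Dom_is_valid_fill n c sequence fills → Pre_is_valid_fill n c sequence fills → D_is_valid_fill n c sequence fills → is_valid_fill n c sequence fills ≠ is_valid_fill_alt n c sequence fills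

-- ===== LEMMAS AND PROOFS =====

-- reference: the filled sequence, built from position fi of fills
def pvFilled (fills : List Int) : List Int → Int → List Int
  | [], _ => []
  | x :: rest, fi =>
      if x = 0 then ((PySem.List.pyGet? fills fi).getD 0) :: pvFilled fills rest (fi + 1)
      else x :: pvFilled fills rest fi

theorem pvAfold_eq (fills : List Int) : ∀ (seq : List Int) (acc : List Int) (fi : Int),
    (seq.foldl (fun (st : List Int × Int) num =>
      if num = 0 then (st.1 ++ [(PySem.List.pyGet? fills st.2).getD 0], st.2 + 1)
      else (st.1 ++ [num], st.2)) (acc, fi)).1 = acc ++ pvFilled fills seq fi := by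
  intro seq
  induction seq with
  | nil => intro acc fi; simp [pvFilled]
  | cons x rest ih =>
      intro acc fi
      by_cases hx : x = 0 <;> simp [pvFilled, hx, List.foldl_cons, ih] <;> simp [List.append_assoc]

theorem pvBfold_eq (fills : List Int) : ∀ (seq : List Int) (fi cnt : Int),
    (seq.foldl (fun (st : Int × Int) x =>
      let v := if x = 0 then (PySem.List.pyGet? fills st.1).getD 0 else x
      (if x = 0 then st.1 + 1 else st.1, if v ≤ 1 then st.2 + 1 else st.2)) (fi, cnt)).2
    = cnt + ((pvFilled fills seq fi).countP (fun x => decide (x ≤ 1)) : Int) := by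
  intro seq
  induction seq with
  | nil => intro fi cnt; simp [pvFilled]
  | cons x rest ih =>
      intro fi cnt
      by_cases hx : x = 0
      · by_cases hv : (PySem.List.pyGet? fills fi).getD 0 ≤ 1 <;>
          simp [pvFilled, hx, hv, List.foldl_cons, ih, List.countP_cons] <;> push_cast <;> ring
      · by_cases hv : x ≤ 1 <;>
          simp [pvFilled, hx, hv, List.foldl_cons, ih, List.countP_cons] <;> push_cast <;> ring

theorem pvInnerA_eq (c i : Int) : ∀ (xs : List Int) (k : Int), k < c →
    pvInnerA c i xs k = decide (c ≤ k + (xs.countP (fun x => decide (x ≤ i)) : Int)) := by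
  intro xs
  induction xs with
  | nil => intro k hk; simp [pvInnerA]; omega
  | cons f rest ih =>
      intro k hk
      by_cases hf : f ≤ i
      · by_cases hb : k + 1 ≥ c
        · have : (rest.countP (fun x => decide (x ≤ i)) : Int) ≥ 0 := by positivity
          simp [pvInnerA, hf, hb, List.countP_cons]
          omega
        · have := ih (k + 1) (by omega)
          simp [pvInnerA, hf, hb, this, List.countP_cons]
          constructor <;> intro h <;> omega
      · simp [pvInnerA, hf, List.countP_cons, ih k hk]

theorem pvInnerA_true_of_mem (c i : Int) (hc : c ≤ 1) : ∀ (xs : List Int) (k : Int), 0 ≤ k →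
    (∃ x ∈ xs, x ≤ i) → pvInnerA c i xs k = true := by
  intro xs
  induction xs with
  | nil => simp
  | cons f rest ih =>
      intro k hk hex
      by_cases hf : f ≤ i
      · simp [pvInnerA, hf, show k + 1 ≥ c by omega]
      · obtain ⟨x, hx, hxi⟩ := hex
        rcases List.mem_cons.mp hx with h | h
        · exact absurd (h ▸ hxi) hf
        · simp [pvInnerA, hf]; exact ih k hk ⟨x, h, hxi⟩

theorem pvInnerA_false_of_forall (c i : Int) : ∀ (xs : List Int) (k : Int),
    (∀ x ∈ xs, ¬ x ≤ i) → pvInnerA c i xs k = false := by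
  intro xs
  induction xs with
  | nil => intro k _; simp [pvInnerA]
  | cons f rest ih =>
      intro k h
      have hf : ¬ f ≤ i := h f (by simp)
      simp [pvInnerA, hf]
      exact ih k fun x hx => h x (by simp [hx])

theorem pvOuterA_eq_all (c : Int) (cur : List Int) : ∀ (is_ : List Int),
    pvOuterA c cur is_ = is_.all (fun i => pvInnerA c i cur 0) := by
  intro is_
  induction is_ with
  | nil => simp [pvOuterA]
  | cons i rest ih =>
      by_cases h : pvInnerA c i cur 0 = true <;> simp [pvOuterA, h, ih]

-- structure of the filled sequence's values, in terms of the raw inputs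
theorem pvFilled_forall (fills : List Int) : ∀ (seq : List Int) (fi : Int), 0 ≤ fi →
    fi.toNat + seq.count 0 ≤ fills.length →
    ((∀ y ∈ pvFilled fills seq fi, 1 < y) ↔
      (∀ x ∈ seq, x = 0 ∨ 1 < x) ∧ (∀ y ∈ (fills.drop fi.toNat).take (seq.count 0), 1 < y)) := by
  intro seq
  induction seq with
  | nil => intro fi _ _; simp [pvFilled, List.count_nil]
  | cons x rest ih =>
      intro fi hfi hlen
      by_cases hx : x = 0
      · subst hx
        have hcount : ((0 : Int) :: rest).count 0 = rest.count 0 + 1 := by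
          simp [List.count_cons]
        have hlt : fi.toNat < fills.length := by
          rw [hcount] at hlen; omega
        have hget : PySem.List.pyGet? fills fi = some fills[fi.toNat] := by
          rw [PySem.List.pyGet?_of_nonneg fills hfi]
          exact List.getElem?_eq_getElem hlt
        have hdrop : fills.drop fi.toNat = fills[fi.toNat] :: fills.drop (fi.toNat + 1) :=
          List.drop_eq_getElem_cons hlt
        have htn : (fi + 1).toNat = fi.toNat + 1 := by omega
        have hih := ih (fi + 1) (by omega) (by rw [htn]; rw [hcount] at hlen; omega)
        rw [htn] at hih
        have hstep : pvFilled fills ((0 : Int) :: rest) fi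
            = fills[fi.toNat] :: pvFilled fills rest (fi + 1) := by
          simp [pvFilled, hget]
        rw [hstep, hcount, hdrop]
        simp only [List.take_succ_cons, List.forall_mem_cons, hih]
        tauto
      · have hcount : (x :: rest).count 0 = rest.count 0 := by
          simp [List.count_cons, hx]
        have hih := ih fi hfi (by rw [hcount] at hlen; omega)
        simp only [pvFilled, if_neg hx, hcount, List.forall_mem_cons, hih]
        tauto

-- main agreement lemma
theorem pvMain (n c : Int) (sequence fills : List Int)
    (hpre : sequence.count 0 ≤ fills.length)
    (hnd : ¬ D_is_valid_fill n c sequence fills) :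
    is_valid_fill n c sequence fills = is_valid_fill_alt n c sequence fills := by
  unfold is_valid_fill is_valid_fill_alt
  rw [pvAfold_eq, pvBfold_eq, pvOuterA_eq_all]
  simp only [List.nil_append]
  set cur := pvFilled fills sequence 0 with hcur
  set N : Int := (cur.countP (fun x => decide (x ≤ 1)) : Int) with hN
  have hN0 : 0 ≤ N := by positivity
  by_cases hn : n ≤ 0
  · rw [PySem.List.pyRange_one_eq_nil (by omega)]
    simp [hn]
  · have hrange : ∀ i ∈ PySem.List.pyRange 1 (n + 1) 1, 1 ≤ i := by
      intro i hi
      exact ((PySem.List.mem_pyRange_one).mp hi).1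
    have hmono : ∀ i : Int, 1 ≤ i →
        cur.countP (fun x => decide (x ≤ 1)) ≤ cur.countP (fun x => decide (x ≤ i)) := by
      intro i hi
      apply List.countP_mono_left
      intro a _ ha
      simp only [decide_eq_true_eq] at *
      omega
    by_cases hc : 1 ≤ c
    · by_cases hcn : c ≤ N
      · have hall : (PySem.List.pyRange 1 (n + 1) 1).all (fun i => pvInnerA c i cur 0) = true := by
          rw [List.all_eq_true]
          intro i hi
          rw [pvInnerA_eq c i cur 0 (by omega)]
          have := hmono i (hrange i hi)
          simp only [decide_eq_true_eq]
          omega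
        simp [hall, hn, hcn]
      · have h1 : (1 : Int) ∈ PySem.List.pyRange 1 (n + 1) 1 := by
          rw [PySem.List.mem_pyRange_one]; omega
        have : (PySem.List.pyRange 1 (n + 1) 1).all (fun i => pvInnerA c i cur 0) = false := by
          rw [List.all_eq_false]
          refine ⟨1, h1, ?_⟩
          rw [pvInnerA_eq c 1 cur 0 (by omega)]
          simp only [decide_eq_true_eq]
          omega
        simp [this, hn, hcn]
    · -- c ≤ 0 and ¬ D: some filled floor is ≤ 1
      have hc' : c ≤ 0 := by omega
      have hex : ∃ y ∈ cur, y ≤ 1 := by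
        by_contra hno
        push_neg at hno
        apply hnd
        have hall : ∀ y ∈ cur, 1 < y := fun y hy => by have := hno y hy; omega
        have := (pvFilled_forall fills sequence 0 le_rfl (by simpa using hpre)).mp hall
        exact ⟨hc', by omega, this.1, by simpa using this.2⟩
      have hall : (PySem.List.pyRange 1 (n + 1) 1).all (fun i => pvInnerA c i cur 0) = true := by
        rw [List.all_eq_true]
        intro i hi
        have hi1 := hrange i hi
        obtain ⟨y, hy, hy1⟩ := hex
        exact pvInnerA_true_of_mem c i (by omega) cur 0 le_rfl ⟨y, hy, by omega⟩
      have hcN : c ≤ N := by omega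
      simp [hall, hn, hcN]

-- ===== VERDICT (by name: the statement is the Claim_ definition above) =====
theorem is_valid_fill_spec : Claim_unchanged_is_valid_fill := by
  intro n c sequence fills _ hpre hnd
  exact pvMain n c sequence fills hpre hnd

theorem is_valid_fill_changed : Claim_changed_is_valid_fill := by
  unfold Claim_changed_is_valid_fill; decide

theorem is_valid_fill_tight : Claim_exact_is_valid_fill := by
  intro n c sequence fills _ hpre hd
  obtain ⟨hc, hn, hseq, hfills⟩ := hd
  unfold is_valid_fill is_valid_fill_alt
  rw [pvAfold_eq, pvBfold_eq, pvOuterA_eq_all]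
  simp only [List.nil_append]
  set cur := pvFilled fills sequence 0 with hcur
  have hallgt : ∀ y ∈ cur, 1 < y := by
    apply (pvFilled_forall fills sequence 0 le_rfl (by simpa using hpre)).mpr
    exact ⟨hseq, by simpa using hfills⟩
  have h1 : (1 : Int) ∈ PySem.List.pyRange 1 (n + 1) 1 := by
    rw [PySem.List.mem_pyRange_one]; omega
  have hAll : (PySem.List.pyRange 1 (n + 1) 1).all (fun i => pvInnerA c i cur 0) = false := by
    rw [List.all_eq_false]
    refine ⟨1, h1, ?_⟩
    rw [pvInnerA_false_of_forall c 1 cur 0 (fun x hx => by have := hallgt x hx; omega)]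
    simp
  have hN0 : (0 : Int) ≤ (cur.countP (fun x => decide (x ≤ 1)) : Int) := by positivity
  simp [hAll, show c ≤ (cur.countP (fun x => decide (x ≤ 1)) : Int) by omega]
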